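-- pv_equiv track=rewrite | github.com/pypi-data/pypi-mirror-403 | packages/s3-security-scanner/s3_security_scanner-1.0.1.tar.gz/s3_security_scanner-1.0.1/s3_security_scanner/checks/soc2_monitoring.py | _calculate_monitoring_score
-- ===== SOURCE A (Python) =====
-- from typing import Dict, Any, List
--
-- def _calculate_monitoring_score(
--     metrics: List[Dict], alarms: List[Dict]
-- ) -> int:
--     """Calculate a monitoring compliance score (0-100)."""
--     score = 0
--
--     # Base score for having any metrics
--     if metrics:
--         score += 30
--
--     # Points for specific metric types
--     metric_names = [m["MetricName"] for m in metrics]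
--     if any("BucketSizeBytes" in name for name in metric_names):
--         score += 20
--     if any("NumberOfObjects" in name for name in metric_names):
--         score += 10
--     if any("Request" in name for name in metric_names):
--         score += 20
--
--     # Points for having alarms
--     if alarms:
--         score += 20
--
--     return min(score, 100)
-- ===== SOURCE B (Python) =====
-- RULES = (("BucketSizeBytes", 20), ("NumberOfObjects", 10), ("Request", 20))
--
--
-- def _scan(metrics, pending, acc):
--     # Recursively consume metrics; each matched rule is removed from 'pending'
--     # and its points are banked; stop as soon as no rules remain.
--     if not pending or not metrics:
--         return acc
--     name = metrics[0]["MetricName"]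
--     found = [r for r in pending if r[0] in name]
--     rest = [r for r in pending if r[0] not in name]
--     return _scan(metrics[1:], rest, acc + sum(p for _, p in found))
--
--
-- def _calculate_monitoring_score(metrics, alarms):
--     # Base points for having any metrics / any alarms, then a table-driven
--     # recursive scan awards each rule's points at most once.  The rule points
--     # plus base points total exactly 100, so no cap is needed.
--     base = (30 if metrics else 0) + (20 if alarms else 0)
--     return _scan(metrics, list(RULES), base)
-- ===== Notes on version B (the rewrite author's own statement) =====
-- stated objective: alternative
-- what changed: B is a table-driven recursive scan: a rule table (substring, points) is consumed as metrics are traversed, matched rules are removed and their points banked, scanning stops early when no rules remain; the cap is dropped because base plus rule points total exactly 100.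
import Mathlib
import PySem

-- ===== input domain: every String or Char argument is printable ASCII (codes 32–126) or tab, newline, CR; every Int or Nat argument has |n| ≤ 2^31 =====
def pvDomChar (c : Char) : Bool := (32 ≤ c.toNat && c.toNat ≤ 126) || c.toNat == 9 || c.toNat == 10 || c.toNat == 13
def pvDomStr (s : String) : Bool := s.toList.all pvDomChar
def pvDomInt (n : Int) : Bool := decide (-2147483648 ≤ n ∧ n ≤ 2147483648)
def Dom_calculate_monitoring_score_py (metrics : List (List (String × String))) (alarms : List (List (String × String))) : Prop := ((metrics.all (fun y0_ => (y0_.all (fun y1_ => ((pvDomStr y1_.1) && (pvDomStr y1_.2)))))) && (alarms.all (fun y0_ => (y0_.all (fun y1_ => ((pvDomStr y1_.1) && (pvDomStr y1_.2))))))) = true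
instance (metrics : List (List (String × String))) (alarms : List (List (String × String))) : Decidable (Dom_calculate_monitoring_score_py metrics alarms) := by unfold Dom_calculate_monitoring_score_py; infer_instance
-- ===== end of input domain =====

-- B replaces A's name list + three any() scans + cap by a table-driven recursive scan
-- that removes matched rules and stops early; base + rule points total 100, so no cap
-- (objective: alternative).

-- ===== PORT A =====
def calculate_monitoring_score_py (metrics : List (List (String × String))) (alarms : List (List (String × String))) : Int :=
  let score : Int := 0
  let score := if metrics ≠ [] then score + 30 else score
  let metric_names := metrics.map (fun m => PySem.Dict.getD (PySem.Dict.mk m) "MetricName" "")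
  let score := if metric_names.any (fun name => PySem.Str.isIn "BucketSizeBytes" name) then score + 20 else score
  let score := if metric_names.any (fun name => PySem.Str.isIn "NumberOfObjects" name) then score + 10 else score
  let score := if metric_names.any (fun name => PySem.Str.isIn "Request" name) then score + 20 else score
  let score := if alarms ≠ [] then score + 20 else score
  min score 100

-- ===== PORT B =====
-- _scan from Source B: consume metrics, removing matched rules from 'pending' and banking
-- their points; stop when either list is exhausted.
def pvScanB : List (List (String × String)) → List (String × Int) → Int → Int
  | _, [], acc => acc
  | [], _ :: _, acc => acc
  | m :: t, q :: qs, acc =>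
      let name := PySem.Dict.getD (PySem.Dict.mk m) "MetricName" ""
      let found := (q :: qs).filter (fun r => PySem.Str.isIn r.1 name)
      let rest := (q :: qs).filter (fun r => !PySem.Str.isIn r.1 name)
      pvScanB t rest (acc + (found.map Prod.snd).sum)

def calculate_monitoring_score_py_alt (metrics : List (List (String × String))) (alarms : List (List (String × String))) : Int :=
  let base : Int := (if metrics ≠ [] then 30 else 0) + (if alarms ≠ [] then 20 else 0)
  pvScanB metrics [("BucketSizeBytes", 20), ("NumberOfObjects", 10), ("Request", 20)] base

-- ===== PRECONDITION & SPEC =====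
-- Pre_ excludes exactly the inputs on which A raises KeyError: a metric dict without
-- the key "MetricName".
def Pre_calculate_monitoring_score_py (metrics : List (List (String × String))) (_alarms : List (List (String × String))) : Prop :=
  metrics.all (fun m => PySem.Dict.contains (PySem.Dict.mk m) "MetricName") = true
instance (metrics : List (List (String × String))) (alarms : List (List (String × String))) : Decidable (Pre_calculate_monitoring_score_py metrics alarms) := by unfold Pre_calculate_monitoring_score_py; infer_instance
def pvWitness_calculate_monitoring_score_py : (List (List (String × String))) × (List (List (String × String))) :=
  ([[("MetricName", "BucketSizeBytes")]], [[("AlarmName", "a")]])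

def Spec_calculate_monitoring_score_py (metrics : List (List (String × String))) (alarms : List (List (String × String))) (out : Int) : Prop := out = calculate_monitoring_score_py_alt metrics alarms
instance (metrics : List (List (String × String))) (alarms : List (List (String × String))) (out : Int) : Decidable (Spec_calculate_monitoring_score_py metrics alarms out) := by unfold Spec_calculate_monitoring_score_py; infer_instance

-- ===== CLAIM =====
def Claim_equal_calculate_monitoring_score_py : Prop := ∀ (metrics : List (List (String × String))) (alarms : List (List (String × String))), Dom_calculate_monitoring_score_py metrics alarms → Pre_calculate_monitoring_score_py metrics alarms → Spec_calculate_monitoring_score_py metrics alarms (calculate_monitoring_score_py metrics alarms)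

-- ===== LEMMAS AND PROOFS =====

-- The "award" each rule would get from a metric list: its points if its substring
-- occurs in some name, else 0.
def pvAward (metrics : List (List (String × String))) (r : String × Int) : Int :=
  if metrics.any (fun m => PySem.Str.isIn r.1 (PySem.Dict.getD (PySem.Dict.mk m) "MetricName" "")) then r.2 else 0

theorem pvAward_nil (r : String × Int) : pvAward [] r = 0 := by simp [pvAward]

theorem pvAward_cons (m : List (String × String)) (t : List (List (String × String))) (r : String × Int) :
    pvAward (m :: t) r =
      (if PySem.Str.isIn r.1 (PySem.Dict.getD (PySem.Dict.mk m) "MetricName" "") then r.2 else 0) +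
      (if PySem.Str.isIn r.1 (PySem.Dict.getD (PySem.Dict.mk m) "MetricName" "") then 0 else pvAward t r) := by
  cases h : PySem.Str.isIn r.1 (PySem.Dict.getD (PySem.Dict.mk m) "MetricName" "") with
  | true => simp only [pvAward, List.any_cons, h, Bool.true_or]; simp
  | false => simp only [pvAward, List.any_cons, h, Bool.false_or]; simp

theorem pvSplit (m : List (String × String)) (t : List (List (String × String)))
    (l : List (String × Int)) :
    ((l.filter (fun r => PySem.Str.isIn r.1 (PySem.Dict.getD (PySem.Dict.mk m) "MetricName" ""))).map Prod.snd).sum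
    + ((l.filter (fun r => !PySem.Str.isIn r.1 (PySem.Dict.getD (PySem.Dict.mk m) "MetricName" ""))).map (pvAward t)).sum
    = (l.map (pvAward (m :: t))).sum := by
  induction l with
  | nil => simp
  | cons r rs ihl =>
    cases h : PySem.Str.isIn r.1 (PySem.Dict.getD (PySem.Dict.mk m) "MetricName" "") with
    | true =>
      simp only [List.filter_cons, h, Bool.not_true, List.map_cons, List.sum_cons, pvAward_cons]
      rw [← ihl]
      simp
      ring
    | false =>
      simp only [List.filter_cons, h, Bool.not_false, List.map_cons, List.sum_cons, pvAward_cons]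
      rw [← ihl]
      simp
      ring

theorem pvScanB_eq (metrics : List (List (String × String))) :
    ∀ (pending : List (String × Int)) (acc : Int),
      pvScanB metrics pending acc = acc + (pending.map (pvAward metrics)).sum := by
  induction metrics with
  | nil =>
    intro pending acc
    have hz : pvAward [] = fun _ => (0 : Int) := funext fun r => pvAward_nil r
    cases pending <;> simp [pvScanB, hz]
  | cons m t ih =>
    intro pending acc
    cases pending with
    | nil => simp [pvScanB, List.map_nil]
    | cons q qs =>
      show pvScanB t _ _ = _
      rw [ih, ← pvSplit m t (q :: qs)]
      ring

-- ===== VERDICT =====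
theorem calculate_monitoring_score_py_spec : Claim_equal_calculate_monitoring_score_py := by
  intro metrics alarms _ _
  unfold Spec_calculate_monitoring_score_py calculate_monitoring_score_py calculate_monitoring_score_py_alt
  rw [pvScanB_eq]
  simp only [List.map_cons, List.map_nil, List.sum_cons, List.sum_nil, pvAward,
    List.any_map, Function.comp_def]
  split_ifs <;> norm_num
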